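-- pv_equiv track=rewrite | github.com/manticore-projects/sphinx-javadoc-xml | sphinx_javadoc_xml/links.py | _find_jdk_module
-- ===== SOURCE A (Python) =====
-- from typing import Dict, Optional, Set, Tuple
--
-- _JDK_MODULES: Dict[str, str] = {
--     "java.lang": "java.base",
--     "java.lang.annotation": "java.base",
--     "java.lang.invoke": "java.base",
--     "java.lang.reflect": "java.base",
--     "java.lang.ref": "java.base",
--     "java.io": "java.base",
--     "java.math": "java.base",
--     "java.net": "java.base",
--     "java.nio": "java.base",
--     "java.nio.channels": "java.base",
--     "java.nio.charset": "java.base",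
--     "java.nio.file": "java.base",
--     "java.security": "java.base",
--     "java.text": "java.base",
--     "java.time": "java.base",
--     "java.util": "java.base",
--     "java.util.concurrent": "java.base",
--     "java.util.concurrent.atomic": "java.base",
--     "java.util.concurrent.locks": "java.base",
--     "java.util.function": "java.base",
--     "java.util.logging": "java.logging",
--     "java.util.regex": "java.base",
--     "java.util.stream": "java.base",
--     "java.sql": "java.sql",
--     "javax.sql": "java.sql",
-- }
--
-- def _find_jdk_module(qualified: str) -> Optional[str]:
--     """Find the JDK module for a qualified class name."""
--     # Try longest matching prefix
--     parts = qualified.rsplit(".", 1)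
--     if len(parts) < 2:
--         return None
--     pkg = parts[0]
--     # Walk up the package hierarchy
--     while pkg:
--         if pkg in _JDK_MODULES:
--             return _JDK_MODULES[pkg]
--         if "." not in pkg:
--             break
--         pkg = pkg.rsplit(".", 1)[0]
--     return None
-- ===== SOURCE B (Python) =====
-- _JDK_MODULES = {
--     "java.lang": "java.base",
--     "java.lang.annotation": "java.base",
--     "java.lang.invoke": "java.base",
--     "java.lang.reflect": "java.base",
--     "java.lang.ref": "java.base",
--     "java.io": "java.base",
--     "java.math": "java.base",
--     "java.net": "java.base",
--     "java.nio": "java.base",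
--     "java.nio.channels": "java.base",
--     "java.nio.charset": "java.base",
--     "java.nio.file": "java.base",
--     "java.security": "java.base",
--     "java.text": "java.base",
--     "java.time": "java.base",
--     "java.util": "java.base",
--     "java.util.concurrent": "java.base",
--     "java.util.concurrent.atomic": "java.base",
--     "java.util.concurrent.locks": "java.base",
--     "java.util.function": "java.base",
--     "java.util.logging": "java.logging",
--     "java.util.regex": "java.base",
--     "java.util.stream": "java.base",
--     "java.sql": "java.sql",
--     "javax.sql": "java.sql",
-- }
--
--
-- def _find_jdk_module(qualified):
--     """Find the JDK module for a qualified class name.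
--
--     Works on dot-separated segment lists: split the qualified name once,
--     drop the class segment, then scan the module table once and keep the
--     module of the key whose segment list is the longest prefix of the
--     package's segment list (instead of walking up the hierarchy with
--     repeated rsplit and dict probes)."""
--     segs = qualified.split(".")
--     if len(segs) < 2:
--         return None
--     pkg_segs = segs[:-1]
--     best_len = 0
--     best = None
--     for key, module in _JDK_MODULES.items():
--         ks = key.split(".")
--         if len(ks) <= len(pkg_segs) and pkg_segs[:len(ks)] == ks and len(ks) > best_len:
--             best_len = len(ks)
--             best = module
--     return best
-- ===== Notes on version B (the rewrite author's own statement) =====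
-- stated objective: alternative
-- what changed: Replaces the walk up the package hierarchy (repeated rsplit and dict probes) by one split of the name into dot-separated segments and a single scan of the module table keeping the module whose key segment list is the longest prefix of the package segment list.
import Mathlib
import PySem

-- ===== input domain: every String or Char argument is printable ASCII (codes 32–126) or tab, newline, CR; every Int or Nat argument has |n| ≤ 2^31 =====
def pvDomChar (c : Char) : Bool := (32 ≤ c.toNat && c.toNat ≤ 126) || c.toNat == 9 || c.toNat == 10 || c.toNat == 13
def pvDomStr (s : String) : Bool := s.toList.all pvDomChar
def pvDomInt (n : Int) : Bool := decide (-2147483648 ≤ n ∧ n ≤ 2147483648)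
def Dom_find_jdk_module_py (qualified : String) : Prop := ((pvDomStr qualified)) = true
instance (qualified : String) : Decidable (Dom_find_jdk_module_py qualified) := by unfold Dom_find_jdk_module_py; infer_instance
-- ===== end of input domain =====

-- B replaces A's walk up the package hierarchy (repeated rsplit + dict probe) by one
-- split into dot-separated segments and a single longest-segment-prefix scan of the table.

-- ===== PORT A =====

-- the _JDK_MODULES dict literal, keys as List Char (insertion order)
def jdkItems : List (List Char × String) :=
  [("java.lang".toList, "java.base"),
   ("java.lang.annotation".toList, "java.base"),
   ("java.lang.invoke".toList, "java.base"),
   ("java.lang.reflect".toList, "java.base"),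
   ("java.lang.ref".toList, "java.base"),
   ("java.io".toList, "java.base"),
   ("java.math".toList, "java.base"),
   ("java.net".toList, "java.base"),
   ("java.nio".toList, "java.base"),
   ("java.nio.channels".toList, "java.base"),
   ("java.nio.charset".toList, "java.base"),
   ("java.nio.file".toList, "java.base"),
   ("java.security".toList, "java.base"),
   ("java.text".toList, "java.base"),
   ("java.time".toList, "java.base"),
   ("java.util".toList, "java.base"),
   ("java.util.concurrent".toList, "java.base"),
   ("java.util.concurrent.atomic".toList, "java.base"),
   ("java.util.concurrent.locks".toList, "java.base"),
   ("java.util.function".toList, "java.base"),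
   ("java.util.logging".toList, "java.logging"),
   ("java.util.regex".toList, "java.base"),
   ("java.util.stream".toList, "java.base"),
   ("java.sql".toList, "java.sql"),
   ("javax.sql".toList, "java.sql")]

def jdkDict : PySem.Dict (List Char) String := PySem.Dict.ofList jdkItems

-- hand port of s.rsplit(".", 1) (PySem has no rsplit): returns (some head-part, tail-part)
-- when a "." occurs, (none, s) when not -- i.e. Python's 2- resp. 1-element part list.
-- Exact for the one-character separator ".": it splits at the LAST dot.
def pvRsplitDot1 : List Char → Option (List Char) × List Char
  | [] => (none, [])
  | c :: rest =>
    match pvRsplitDot1 rest with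
    | (some p, b) => (some (c :: p), b)
    | (none, _) => if c = '.' then (some [], rest) else (none, c :: rest)

-- A's while-loop; fuel = pkg.length bounds the walk (each rsplit step strictly shortens pkg)
def walkA : Nat → List Char → Option String
  | 0, _ => none            -- unreachable under pkg.length ≤ fuel: length 0 means pkg = [], and "while pkg" stops
  | fuel + 1, pkg =>
    if pkg = [] then none   -- "while pkg" guard fails
    else
      match jdkDict.get? pkg with
      | some v => some v
      | none =>
        if PySem.Chars.isIn ['.'] pkg then
          walkA fuel ((pvRsplitDot1 pkg).1.getD [])
        else none

def find_jdk_module_py (qualified : String) : Option String :=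
  match (pvRsplitDot1 qualified.toList).1 with
  | none => none            -- len(parts) < 2
  | some pkg => walkA pkg.length pkg

-- ===== PORT B =====

-- B keeps the _JDK_MODULES literal as the association list it iterates (String keys)
def jdkTable : List (String × String) :=
  [("java.lang", "java.base"),
   ("java.lang.annotation", "java.base"),
   ("java.lang.invoke", "java.base"),
   ("java.lang.reflect", "java.base"),
   ("java.lang.ref", "java.base"),
   ("java.io", "java.base"),
   ("java.math", "java.base"),
   ("java.net", "java.base"),
   ("java.nio", "java.base"),
   ("java.nio.channels", "java.base"),
   ("java.nio.charset", "java.base"),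
   ("java.nio.file", "java.base"),
   ("java.security", "java.base"),
   ("java.text", "java.base"),
   ("java.time", "java.base"),
   ("java.util", "java.base"),
   ("java.util.concurrent", "java.base"),
   ("java.util.concurrent.atomic", "java.base"),
   ("java.util.concurrent.locks", "java.base"),
   ("java.util.function", "java.base"),
   ("java.util.logging", "java.logging"),
   ("java.util.regex", "java.base"),
   ("java.util.stream", "java.base"),
   ("java.sql", "java.sql"),
   ("javax.sql", "java.sql")]

-- hand port of s.split(".") for the one-character separator "." (exact: "" -> [""],
-- "a..b" -> ["a","","b"], a trailing/leading dot yields an empty segment)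
def pvSplitDot : List Char → List (List Char)
  | [] => [[]]
  | c :: rest =>
    match pvSplitDot rest with
    | [] => [[]]                       -- unreachable: the split is never empty
    | seg :: segs => if c = '.' then [] :: seg :: segs else (c :: seg) :: segs

-- loop body of B: state (best_len, best); segs[:len(ks)] is List.take (nonnegative bound, exact)
def pvSegStep (psegs : List (List Char)) (st : Nat × Option String) (kv : String × String) :
    Nat × Option String :=
  let ks := pvSplitDot kv.1.toList
  if ks.length ≤ psegs.length ∧ psegs.take ks.length = ks ∧ st.1 < ks.length then
    (ks.length, some kv.2)
  else st

def find_jdk_module_py_alt (qualified : String) : Option String :=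
  if (pvSplitDot qualified.toList).length < 2 then none         -- len(segs) < 2
  else
    -- pkg_segs = segs[:-1]; on a list of length ≥ 2 the slice [:-1] is dropLast (exact)
    (jdkTable.foldl (pvSegStep (pvSplitDot qualified.toList).dropLast) (0, none)).2

-- ===== PRECONDITION & SPEC =====
def Spec_find_jdk_module_py (qualified : String) (out : Option String) : Prop := out = find_jdk_module_py_alt qualified
instance (qualified : String) (out : Option String) : Decidable (Spec_find_jdk_module_py qualified out) := by unfold Spec_find_jdk_module_py; infer_instance

-- ===== CLAIM (what is proved, stated in full; the proofs are below) =====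
def Claim_equal_find_jdk_module_py : Prop := ∀ (qualified : String), Dom_find_jdk_module_py qualified → Spec_find_jdk_module_py qualified (find_jdk_module_py qualified)

-- ===== LEMMAS AND PROOFS =====

-- join with "." , left inverse of pvSplitDot
def pvJoinDot : List (List Char) → List Char
  | [] => []
  | [s] => s
  | s :: t :: rest => s ++ '.' :: pvJoinDot (t :: rest)

lemma pvSplitDot_ne_nil (cs : List Char) : pvSplitDot cs ≠ [] := by
  cases cs with
  | nil => simp [pvSplitDot]
  | cons c rest =>
    simp only [pvSplitDot]
    rcases pvSplitDot rest with _ | ⟨seg, segs⟩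
    · simp
    · by_cases hc : c = '.' <;> simp [hc]

lemma pvJoinDot_pvSplitDot (cs : List Char) : pvJoinDot (pvSplitDot cs) = cs := by
  induction cs with
  | nil => rfl
  | cons c rest ih =>
    simp only [pvSplitDot]
    rcases h : pvSplitDot rest with _ | ⟨seg, segs⟩
    · exact absurd h (pvSplitDot_ne_nil rest)
    · rw [h] at ih
      by_cases hc : c = '.'
      · subst hc
        simp [pvJoinDot, ih]
      · simp only [if_neg hc]
        cases segs with
        | nil => simp only [pvJoinDot] at ih ⊢; rw [ih]
        | cons t ts => simp only [pvJoinDot] at ih ⊢; rw [List.cons_append, ih]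

lemma pvSplitDot_inj {cs cs' : List Char} (h : pvSplitDot cs = pvSplitDot cs') : cs = cs' := by
  rw [← pvJoinDot_pvSplitDot cs, ← pvJoinDot_pvSplitDot cs', h]

lemma pvSplitDot_no_dot {cs : List Char} (h : '.' ∉ cs) : pvSplitDot cs = [cs] := by
  induction cs with
  | nil => rfl
  | cons c rest ih =>
    have hc : c ≠ '.' := fun hc => h (by simp [hc])
    have hr : pvSplitDot rest = [rest] := ih (fun hm => h (by simp [hm]))
    simp [pvSplitDot, hr, hc]

lemma pvSplitDot_concat (p b : List Char) (hb : '.' ∉ b) :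
    pvSplitDot (p ++ '.' :: b) = pvSplitDot p ++ [b] := by
  induction p with
  | nil => simp [pvSplitDot, pvSplitDot_no_dot hb]
  | cons a p' ih =>
    rcases h' : pvSplitDot p' with _ | ⟨seg, segs⟩
    · exact absurd h' (pvSplitDot_ne_nil p')
    · simp only [List.cons_append, pvSplitDot, ih, h']
      by_cases ha : a = '.' <;> simp [ha]

lemma pvRsplitDot1_none {cs b : List Char} (h : pvRsplitDot1 cs = (none, b)) : '.' ∉ cs := by
  induction cs generalizing b with
  | nil => simp
  | cons c rest ih =>
    simp only [pvRsplitDot1] at h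
    rcases hr : pvRsplitDot1 rest with ⟨p?, b'⟩
    rw [hr] at h
    cases p? with
    | some p => simp at h
    | none =>
      by_cases hc : c = '.'
      · simp [hc] at h
      · intro hmem
        rcases List.mem_cons.mp hmem with h' | h'
        · exact hc h'.symm
        · exact ih hr h'

lemma pvRsplitDot1_some {cs p b : List Char} (h : pvRsplitDot1 cs = (some p, b)) :
    cs = p ++ '.' :: b ∧ '.' ∉ b := by
  induction cs generalizing p b with
  | nil => simp [pvRsplitDot1] at h
  | cons c rest ih =>
    simp only [pvRsplitDot1] at h
    rcases hr : pvRsplitDot1 rest with ⟨p?, b'⟩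
    rw [hr] at h
    cases p? with
    | some p' =>
      simp at h
      obtain ⟨⟨rfl, rfl⟩, rfl⟩ := h
      obtain ⟨h1, h2⟩ := ih hr
      exact ⟨by simp [h1], h2⟩
    | none =>
      by_cases hc : c = '.'
      · simp [hc] at h
        obtain ⟨rfl, rfl⟩ := h
        exact ⟨by simp [hc], pvRsplitDot1_none hr⟩
      · simp [hc] at h

lemma dot_isIn_iff (cs : List Char) : PySem.Chars.isIn ['.'] cs = true ↔ '.' ∈ cs := by
  rw [PySem.Chars.isIn_iff_infix]
  constructor
  · intro h; exact h.subset (by simp)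
  · intro h
    obtain ⟨s, t, rfl⟩ := List.append_of_mem h
    exact ⟨s, t, by simp⟩

-- the first two conjuncts of B's loop condition, as a proposition on the input
def segMatch (psegs ks : List (List Char)) : Prop :=
  ks.length ≤ psegs.length ∧ psegs.take ks.length = ks

lemma segMatch_iff_prefix (psegs ks : List (List Char)) : segMatch psegs ks ↔ ks <+: psegs := by
  constructor
  · rintro ⟨_, h2⟩; exact h2 ▸ List.take_prefix _ _
  · intro h; exact ⟨h.length_le, List.prefix_iff_eq_take.mp h ▸ rfl⟩

-- a fold whose segment-prefix test never fires leaves the state unchanged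
lemma foldl_seg_no_match (psegs : List (List Char)) :
    ∀ (l : List (String × String)) (st : Nat × Option String),
    (∀ kv ∈ l, ¬ segMatch psegs (pvSplitDot kv.1.toList)) →
    l.foldl (pvSegStep psegs) st = st := by
  intro l
  induction l with
  | nil => intro st _; rfl
  | cons kv l ih =>
    intro st h
    have hkv := h kv (by simp)
    simp only [List.foldl_cons]
    rw [show pvSegStep psegs st kv = st by
      simp only [pvSegStep]
      rw [if_neg (fun hc => hkv ⟨hc.1, hc.2.1⟩)]]
    exact ih st (fun x hx => h x (by simp [hx]))

-- two segment lists that give every key the same match-verdict drive the fold identically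
lemma foldl_seg_congr (psegs psegs' : List (List Char)) :
    ∀ (l : List (String × String)) (st : Nat × Option String),
    (∀ kv ∈ l, segMatch psegs (pvSplitDot kv.1.toList) ↔ segMatch psegs' (pvSplitDot kv.1.toList)) →
    l.foldl (pvSegStep psegs) st = l.foldl (pvSegStep psegs') st := by
  intro l
  induction l with
  | nil => intro st _; rfl
  | cons kv l ih =>
    intro st h
    have hkv := h kv (by simp)
    simp only [List.foldl_cons]
    rw [show pvSegStep psegs st kv = pvSegStep psegs' st kv by
      simp only [pvSegStep]
      by_cases hs : st.1 < (pvSplitDot kv.1.toList).length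
      · by_cases hm : segMatch psegs (pvSplitDot kv.1.toList)
        · rw [if_pos ⟨hm.1, hm.2, hs⟩,
              if_pos ⟨(hkv.mp hm).1, (hkv.mp hm).2, hs⟩]
        · rw [if_neg (fun hc => hm ⟨hc.1, hc.2.1⟩),
              if_neg (fun hc => hm (hkv.mpr ⟨hc.1, hc.2.1⟩))]
      · rw [if_neg (fun hc => hs hc.2.2), if_neg (fun hc => hs hc.2.2)]]
    exact ih _ (fun x hx => h x (by simp [hx]))

-- every table key, as chars, is a key of A's dict (and conversely the items align)
lemma jdkTable_mem_items : ∀ kv ∈ jdkTable, (kv.1.toList, kv.2) ∈ jdkItems := by decide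

-- a prefix of l ++ [x] is the whole list or a prefix of l
lemma prefix_concat_cases {α : Type} {ks l : List α} {x : α} (h : ks <+: l ++ [x]) :
    ks = l ++ [x] ∨ ks <+: l := by
  rcases h with ⟨t, ht⟩
  cases t with
  | nil => left; simpa using ht
  | cons y ys =>
    right
    have hlen : ks.length ≤ l.length := by
      have := congrArg List.length ht
      simp at this
      omega
    have hpre : ks <+: l ++ [x] := ⟨y :: ys, ht⟩
    rw [List.prefix_iff_eq_take] at hpre ⊢
    rw [List.take_append_of_le_length hlen] at hpre
    exact hpre

-- stepping from pkg = p ++ "." ++ b (pkg not a key) to its parent p keeps every verdict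
lemma segMatch_parent {p b : List Char} (hb : '.' ∉ b) (kv : String × String)
    (hne : kv.1.toList ≠ p ++ '.' :: b) :
    segMatch (pvSplitDot (p ++ '.' :: b)) (pvSplitDot kv.1.toList) ↔
    segMatch (pvSplitDot p) (pvSplitDot kv.1.toList) := by
  rw [segMatch_iff_prefix, segMatch_iff_prefix, pvSplitDot_concat p b hb]
  constructor
  · intro h
    rcases prefix_concat_cases h with h' | h'
    · exact absurd (pvSplitDot_inj (h'.trans (pvSplitDot_concat p b hb).symm)) hne
    · exact h'
  · intro h
    exact h.trans (List.prefix_append _ _)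

-- main invariant: A's walk from pkg equals B's fold driven by pkg's segment list
lemma walkA_eq_fold : ∀ (fuel : Nat) (pkg : List Char), pkg.length ≤ fuel →
    walkA fuel pkg = (jdkTable.foldl (pvSegStep (pvSplitDot pkg)) (0, none)).2 := by
  intro fuel
  induction fuel with
  | zero =>
    intro pkg hlen
    have : pkg = [] := List.eq_nil_of_length_eq_zero (Nat.le_zero.mp hlen)
    subst this
    decide
  | succ fuel ih =>
    intro pkg hlen
    by_cases hne : pkg = []
    · subst hne
      rw [show walkA (fuel + 1) ([] : List Char) = none by simp [walkA]]
      decide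
    · cases hget : jdkDict.get? pkg with
      | some v =>
        have hm : (pkg, v) ∈ jdkItems := by
          exact PySem.Dict.mem_items_of_get?_eq_some jdkDict hget
        rw [show walkA (fuel + 1) pkg = some v by simp [walkA, hne, hget]]
        fin_cases hm <;> decide
      | none =>
        have hkeys : pkg ∉ jdkDict.keys :=
          (PySem.Dict.get?_eq_none_iff_not_mem_keys jdkDict pkg).mp hget
        have hnotkey : ∀ kv ∈ jdkTable, kv.1.toList ≠ pkg := by
          intro kv hkv h
          apply hkeys
          have : jdkDict.keys = jdkItems.map Prod.fst := by decide
          rw [this, ← h]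
          exact List.mem_map_of_mem (jdkTable_mem_items kv hkv)
        rcases hsplit : pvRsplitDot1 pkg with ⟨p?, b⟩
        cases p? with
        | none =>
          have hdot : '.' ∉ pkg := pvRsplitDot1_none hsplit
          have hii : PySem.Chars.isIn ['.'] pkg = false := by
            rw [← Bool.not_eq_true, dot_isIn_iff]; exact hdot
          rw [show walkA (fuel + 1) pkg = none by simp [walkA, hne, hget, hii]]
          rw [foldl_seg_no_match _ _ _ ?_]
          intro kv hkv hmatch
          rw [segMatch_iff_prefix, pvSplitDot_no_dot hdot] at hmatch
          rcases prefix_concat_cases (l := []) (by simpa using hmatch) with h' | h'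
          · exact hnotkey kv hkv (by
              have := pvSplitDot_inj (cs := kv.1.toList) (cs' := pkg)
                (by rw [pvSplitDot_no_dot hdot]; simpa using h')
              exact this)
          · exact pvSplitDot_ne_nil kv.1.toList (List.prefix_nil.mp h')
        | some p =>
          obtain ⟨hpkg, hb⟩ := pvRsplitDot1_some hsplit
          have hii : PySem.Chars.isIn ['.'] pkg = true := by
            rw [dot_isIn_iff, hpkg]; simp
          have hstep : walkA (fuel + 1) pkg = walkA fuel p := by
            simp [walkA, hne, hget, hii, hsplit]
          have hplen : p.length ≤ fuel := by
            have : pkg.length = p.length + b.length + 1 := by simp [hpkg]; omega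
            omega
          rw [hstep, ih p hplen]
          refine congrArg Prod.snd (foldl_seg_congr _ _ _ _ ?_).symm
          intro kv hkv
          rw [hpkg]
          exact segMatch_parent hb kv (hpkg ▸ hnotkey kv hkv)

-- ===== VERDICT (by name: the statement is the Claim_ definition above) =====
theorem find_jdk_module_py_spec : Claim_equal_find_jdk_module_py := by
  intro qualified _
  unfold Spec_find_jdk_module_py find_jdk_module_py find_jdk_module_py_alt
  rcases h : pvRsplitDot1 qualified.toList with ⟨p?, b⟩
  cases p? with
  | none =>
    have hdot : '.' ∉ qualified.toList := pvRsplitDot1_none h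
    simp [pvSplitDot_no_dot hdot]
  | some p =>
    obtain ⟨hq, hb⟩ := pvRsplitDot1_some h
    have hlen : ¬ (pvSplitDot p ++ [b]).length < 2 := by
      have h1 : 1 ≤ (pvSplitDot p).length := List.length_pos_of_ne_nil (pvSplitDot_ne_nil p)
      have h2 : (pvSplitDot p ++ [b]).length = (pvSplitDot p).length + 1 := by simp
      omega
    simp only [hq, pvSplitDot_concat p b hb, if_neg hlen, List.dropLast_concat]
    exact walkA_eq_fold p.length p (Nat.le_refl _)
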